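-- pv_equiv track=rewrite | github.com/DRybkow/check_IO | ScientificExpedition/caps-lock.py | caps_lock
-- ===== SOURCE A (Python) =====
-- def caps_lock(text: str) -> str:
--
--     t=text.split('a')
--     j=0
--     l=''
--     for i in t:
--         if j%2==1:
--             k=i.upper()
--             l+=k
--         else:
--             l+=i
--         j+=1
--     return l
-- ===== SOURCE B (Python) =====
-- def caps_lock(text: str) -> str:
--     out = []
--     count = 0
--     for c in text:
--         if c == 'a':
--             count += 1
--         else:
--             out.append(c.upper() if count % 2 == 1 else c)
--     return ''.join(out)
-- ===== Notes on version B (the rewrite author's own statement) =====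
-- stated objective: simpler
-- what changed: Replaces split-on-'a' plus a segment loop with a counter with a single character scan that drops 'a's and uppercases a character exactly when the number of 'a's seen so far is odd.
import Mathlib
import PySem

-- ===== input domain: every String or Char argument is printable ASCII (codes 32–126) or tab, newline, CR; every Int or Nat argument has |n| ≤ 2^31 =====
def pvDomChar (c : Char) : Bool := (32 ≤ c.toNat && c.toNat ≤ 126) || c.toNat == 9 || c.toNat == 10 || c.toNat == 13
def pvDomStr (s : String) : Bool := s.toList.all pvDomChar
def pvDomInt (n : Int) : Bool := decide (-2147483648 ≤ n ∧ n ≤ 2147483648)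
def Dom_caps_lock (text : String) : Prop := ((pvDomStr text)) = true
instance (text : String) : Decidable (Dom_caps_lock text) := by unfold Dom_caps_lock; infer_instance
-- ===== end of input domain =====

-- B replaces split-on-'a' plus an indexed segment loop by a single parity-counted character scan (simpler decomposition, same cost).

-- ===== PORT A =====
-- loop body of A: state (j, l); segment uppercased when j is odd, then j += 1
def capsStepA (st : Int × List Char) (i : List Char) : Int × List Char :=
  if PySem.Int.mod st.1 2 == 1 then (st.1 + 1, st.2 ++ PySem.Chars.upper i)
  else (st.1 + 1, st.2 ++ i)

def caps_lock (text : String) : String :=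
  String.ofList ((PySem.Chars.splitOn text.toList ['a']).foldl capsStepA (0, [])).2

-- ===== PORT B =====
-- loop body of B: state (count, out); drop 'a' and count it, else append (uppercased when count is odd)
def capsStepB (st : Int × List Char) (c : Char) : Int × List Char :=
  if c == 'a' then (st.1 + 1, st.2)
  else (st.1, st.2 ++ [if PySem.Int.mod st.1 2 == 1 then PySem.Chars.upperChar c else c])

def caps_lock_alt (text : String) : String :=
  String.ofList (text.toList.foldl capsStepB (0, [])).2

-- ===== PRECONDITION & SPEC =====
def Spec_caps_lock (text : String) (out : String) : Prop := out = caps_lock_alt text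
instance (text : String) (out : String) : Decidable (Spec_caps_lock text out) := by unfold Spec_caps_lock; infer_instance

-- ===== CLAIM (what is proved, stated in full; the proofs are below) =====
def Claim_equal_caps_lock : Prop := ∀ (text : String), Dom_caps_lock text → Spec_caps_lock text (caps_lock text)

-- ===== LEMMAS AND PROOFS =====

-- structural characterisation of splitting a char list on 'a'
def capsSpl : List Char → List (List Char)
  | [] => [[]]
  | c :: cs =>
      if c = 'a' then [] :: capsSpl cs
      else
        match capsSpl cs with
        | [] => [[c]]
        | h :: t => (c :: h) :: t

theorem capsSpl_ne_nil (cs : List Char) : capsSpl cs ≠ [] := by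
  cases cs with
  | nil => simp [capsSpl]
  | cons c cs =>
      simp only [capsSpl]
      split
      · simp
      · split <;> simp

theorem caps_go_nil (fuel : Nat) (cur : List Char) (accs : List (List Char)) :
    PySem.Chars.splitOn.go ['a'] fuel [] cur accs = (cur.reverse :: accs).reverse := by
  rw [PySem.Chars.splitOn.go.eq_def]; cases fuel <;> simp

theorem caps_go_cons (fuel : Nat) (c : Char) (rest cur : List Char) (accs : List (List Char)) :
    PySem.Chars.splitOn.go ['a'] (fuel+1) (c :: rest) cur accs =
      (if ['a'].isPrefixOf (c :: rest) then PySem.Chars.splitOn.go ['a'] fuel rest [] (cur.reverse :: accs)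
       else PySem.Chars.splitOn.go ['a'] fuel rest (c :: cur) accs) := by
  rw [PySem.Chars.splitOn.go.eq_def]; rfl

theorem capsSpl_go (fuel : Nat) : ∀ (l cur : List Char) (accs : List (List Char)),
    l.length < fuel →
    PySem.Chars.splitOn.go ['a'] fuel l cur accs =
      accs.reverse ++ ((cur.reverse ++ (capsSpl l).headI) :: (capsSpl l).tail) := by
  induction fuel with
  | zero => intro l cur accs h; omega
  | succ fuel ih =>
      intro l cur accs h
      cases l with
      | nil => rw [caps_go_nil]; simp [capsSpl]
      | cons c rest =>
          rw [caps_go_cons]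
          have hrest : rest.length < fuel := by simpa using h
          have hne := capsSpl_ne_nil rest
          by_cases hc : c = 'a'
          · subst hc
            rw [if_pos (by simp [List.isPrefixOf])]
            rw [ih _ _ _ hrest]
            cases hsp : capsSpl rest with
            | nil => exact absurd hsp hne
            | cons hh tt => simp [capsSpl, hsp]
          · rw [if_neg (by simp [List.isPrefixOf]; exact fun h => hc h.symm)]
            rw [ih _ _ _ hrest]
            cases hsp : capsSpl rest with
            | nil => exact absurd hsp hne
            | cons hh tt => simp [capsSpl, hsp, hc]

theorem splitOn_eq_capsSpl (cs : List Char) :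
    PySem.Chars.splitOn cs ['a'] = capsSpl cs := by
  unfold PySem.Chars.splitOn
  rw [capsSpl_go (cs.length + 1) cs [] [] (by omega)]
  have hne := capsSpl_ne_nil cs
  cases hsp : capsSpl cs with
  | nil => exact absurd hsp hne
  | cons h t => simp

theorem caps_fold_eq (cs : List Char) : ∀ (j : Int) (acc : List Char),
    ((capsSpl cs).foldl capsStepA (j, acc)).2 = (cs.foldl capsStepB (j, acc)).2 := by
  induction cs with
  | nil =>
      intro j acc
      simp only [capsSpl, List.foldl_cons, List.foldl_nil]
      cases hmod : (PySem.Int.mod j 2 == 1) <;> simp [capsStepA, PySem.Chars.upper]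
  | cons c cs ih =>
      intro j acc
      by_cases hc : c = 'a'
      · subst hc
        have h1 : capsSpl ('a' :: cs) = [] :: capsSpl cs := by simp [capsSpl]
        rw [h1]
        simp only [List.foldl_cons]
        have h2 : capsStepA (j, acc) [] = (j + 1, acc) := by
          unfold capsStepA; split <;> simp [PySem.Chars.upper]
        have h3 : capsStepB (j, acc) 'a' = (j + 1, acc) := by
          simp [capsStepB]
        rw [h2, h3, ih]
      · have hne := capsSpl_ne_nil cs
        cases hsp : capsSpl cs with
        | nil => exact absurd hsp hne
        | cons hh tt =>
            have h1 : capsSpl (c :: cs) = (c :: hh) :: tt := by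
              simp [capsSpl, hc, hsp]
            rw [h1]
            have hb : capsStepB (j, acc) c =
                (j, acc ++ [if PySem.Int.mod j 2 == 1 then PySem.Chars.upperChar c else c]) := by
              simp [capsStepB, hc]
            simp only [List.foldl_cons, hb]
            rw [← ih, hsp]
            simp only [List.foldl_cons]
            congr 1
            unfold capsStepA
            cases hmod : (PySem.Int.mod j 2 == 1) <;>
              simp [PySem.Chars.upper]

-- ===== VERDICT (by name: the statement is the Claim_ definition above) =====
theorem caps_lock_spec : Claim_equal_caps_lock := by
  intro text _
  unfold Spec_caps_lock caps_lock caps_lock_alt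
  rw [splitOn_eq_capsSpl, caps_fold_eq]
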